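-- pv_equiv track=rewrite | github.com/rishisankar/icpc | cses/introductory/test.py | amtDigits
-- ===== SOURCE A (Python) =====
-- def amtDigits(x):
--   ans = 0
--   ct = 1
--   pw = 10
--   while True:
--     if (x >= pw):
--       ans += (pw//10*9)*ct
--       pw *= 10
--       ct+=1
--     else:
--       break
--   pw//=10
--   ans += (x-pw+1)*ct
--   return ans
-- ===== SOURCE B (Python) =====
-- def amtDigits(x):
--   # total digits = x (one per number 1..x) + one extra digit for each (n, power 10^k)
--   # with n >= 10^k; summed threshold by threshold via recursion.
--   def extra(t):
--     if x < t:
--       return 0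
--     return (x - t + 1) + extra(t * 10)
--   return x + extra(10)
-- ===== Notes on version B (the rewrite author's own statement) =====
-- stated objective: simpler
-- what changed: B drops A's (ans, ct, pw) group-by-group accumulation with final partial-group correction and instead computes x plus a recursive sum of (x - t + 1) over thresholds t = 10, 100, ...: each number contributes one digit per power of ten it reaches.
import Mathlib
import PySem

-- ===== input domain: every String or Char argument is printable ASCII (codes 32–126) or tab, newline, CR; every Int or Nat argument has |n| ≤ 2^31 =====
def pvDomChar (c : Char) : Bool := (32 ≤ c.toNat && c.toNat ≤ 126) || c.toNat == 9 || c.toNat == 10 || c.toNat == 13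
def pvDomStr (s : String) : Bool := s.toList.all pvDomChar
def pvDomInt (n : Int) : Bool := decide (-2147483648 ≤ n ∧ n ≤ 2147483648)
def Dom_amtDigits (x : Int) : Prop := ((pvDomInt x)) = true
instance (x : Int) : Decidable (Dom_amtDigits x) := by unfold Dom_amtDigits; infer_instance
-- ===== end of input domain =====

-- B replaces A's (ans, ct, pw) group accumulation by x plus a recursive sum of (x - t + 1)
-- over thresholds t = 10, 100, … (objective: simpler).

-- ===== PORT A =====
-- A's while-loop: state (ans, ct, pw); pw is always a positive power of ten, carried with a
-- positivity proof for termination.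
def amtDigitsLoopA (x ans ct pw : Int) (h : 0 < pw) : Int × Int × Int :=
  if x ≥ pw then
    amtDigitsLoopA x (ans + (PySem.Int.floordiv pw 10 * 9) * ct) (ct + 1) (pw * 10) (by positivity)
  else (ans, ct, pw)
termination_by (x + 1 - pw).toNat
decreasing_by
  rename_i hx
  have : x + 1 - pw * 10 < x + 1 - pw := by nlinarith
  omega

def amtDigits (x : Int) : Int :=
  let (ans, ct, pw) := amtDigitsLoopA x 0 1 10 (by norm_num)
  ans + (x - PySem.Int.floordiv pw 10 + 1) * ct

-- ===== PORT B =====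
-- B's recursive helper extra(t): 0 once x < t, else (x - t + 1) + extra(10*t).
def amtExtra (x t : Int) (h : 0 < t) : Int :=
  if x < t then 0
  else (x - t + 1) + amtExtra x (t * 10) (by positivity)
termination_by (x + 1 - t).toNat
decreasing_by
  rename_i hx
  have : x + 1 - t * 10 < x + 1 - t := by nlinarith
  omega

def amtDigits_alt (x : Int) : Int := x + amtExtra x 10 (by norm_num)

-- ===== PRECONDITION & SPEC =====
def Spec_amtDigits (x : Int) (out : Int) : Prop := out = amtDigits_alt x
instance (x : Int) (out : Int) : Decidable (Spec_amtDigits x out) := by unfold Spec_amtDigits; infer_instance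

-- ===== CLAIM (what is proved, stated in full; the proofs are below) =====
def Claim_equal_amtDigits : Prop := ∀ (x : Int), Dom_amtDigits x → Spec_amtDigits x (amtDigits x)

-- ===== LEMMAS AND PROOFS =====

-- The bridge: provided 10 divides pw, A's loop followed by its final correction equals
-- the same correction applied to the entry state plus B's recursive sum from t = pw.
theorem amtDigitsLoopA_extra (x ans ct pw : Int) (h : 0 < pw) (hdvd : (10:Int) ∣ pw) :
    (amtDigitsLoopA x ans ct pw h).1
      + (x - PySem.Int.floordiv (amtDigitsLoopA x ans ct pw h).2.2 10 + 1)
          * (amtDigitsLoopA x ans ct pw h).2.1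
    = ans + (x - PySem.Int.floordiv pw 10 + 1) * ct + amtExtra x pw h := by
  fun_induction amtDigitsLoopA x ans ct pw h with
  | case1 ans ct pw h hx ih =>
    obtain ⟨q, hq⟩ := hdvd
    have hfd : PySem.Int.floordiv pw 10 = q := by
      rw [PySem.Int.floordiv_eq_ediv_of_pos (by norm_num), hq]
      exact Int.mul_ediv_cancel_left q (by norm_num)
    have hfd10 : PySem.Int.floordiv (pw * 10) 10 = pw := by
      rw [PySem.Int.floordiv_eq_ediv_of_pos (by norm_num)]
      exact Int.mul_ediv_cancel _ (by norm_num)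
    have hstep : amtExtra x pw h = (x - pw + 1) + amtExtra x (pw * 10) (by positivity) := by
      rw [amtExtra]
      simp [not_lt.mpr hx]
    rw [ih ⟨pw, by ring⟩, hstep, hfd, hfd10]
    linear_combination (-ct) * hq
  | case2 ans ct pw h hx =>
    rw [amtExtra]
    simp only [lt_of_not_ge hx, if_pos]
    ring

-- ===== VERDICT (by name: the statement is the Claim_ definition above) =====
theorem amtDigits_spec : Claim_equal_amtDigits := by
  intro x _
  unfold Spec_amtDigits amtDigits amtDigits_alt
  have h := amtDigitsLoopA_extra x 0 1 10 (by norm_num) ⟨1, by norm_num⟩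
  set r := amtDigitsLoopA x 0 1 10 (by norm_num) with hr
  obtain ⟨ans', ct', pw'⟩ := r
  simp only at h ⊢
  rw [h]
  have : PySem.Int.floordiv (10:Int) 10 = 1 := by decide
  rw [this]; ring
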